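-- pv_equiv track=rewrite | github.com/IoannisBouzas/Complex-Data-Management | ex2/rtree.py | find_mbr
-- ===== SOURCE A (Python) =====
-- def find_mbr(coordinates):
--
--     if not coordinates:
--         return None
--
--     min_x = min(coord[0] for coord in coordinates)
--     max_x = max(coord[0] for coord in coordinates)
--     min_y = min(coord[1] for coord in coordinates)
--     max_y = max(coord[1] for coord in coordinates)
--
--     return [min_x, max_x, min_y, max_y]
-- ===== SOURCE B (Python) =====
-- def find_mbr(coordinates):
--     it = iter(coordinates)
--     try:
--         x, y = next(it)
--     except StopIteration:
--         return None
--     min_x = max_x = x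
--     min_y = max_y = y
--     for px, py in it:
--         if px < min_x: min_x = px
--         if px > max_x: max_x = px
--         if py < min_y: min_y = py
--         if py > max_y: max_y = py
--     return [min_x, max_x, min_y, max_y]
-- ===== Notes on version B (the rewrite author's own statement) =====
-- stated objective: simpler
-- what changed: Replaces four separate min/max reductions over the list (four passes) with one pass that seeds all four accumulators from the first point and updates them with comparisons.
import Mathlib
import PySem

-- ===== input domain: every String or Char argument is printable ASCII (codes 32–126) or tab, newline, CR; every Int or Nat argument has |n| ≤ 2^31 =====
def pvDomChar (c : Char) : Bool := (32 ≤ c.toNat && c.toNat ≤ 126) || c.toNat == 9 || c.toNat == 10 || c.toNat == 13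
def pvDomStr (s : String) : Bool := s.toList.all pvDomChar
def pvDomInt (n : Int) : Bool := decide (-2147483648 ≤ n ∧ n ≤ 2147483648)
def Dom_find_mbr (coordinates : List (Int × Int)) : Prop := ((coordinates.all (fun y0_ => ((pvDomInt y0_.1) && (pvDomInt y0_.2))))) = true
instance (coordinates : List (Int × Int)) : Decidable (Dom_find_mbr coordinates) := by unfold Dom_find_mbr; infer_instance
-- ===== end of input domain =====

-- B replaces A's four min/max passes with a single accumulator loop; objective: simpler (one pass).

-- ===== PORT A =====
-- A: guard on empty, then four generator-based min/max reductions over the whole list.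
def find_mbr (coordinates : List (Int × Int)) : Option (List Int) :=
  match coordinates with
  | [] => none
  | _ :: _ =>
    match PySem.List.min? (coordinates.map Prod.fst) (fun v => v),
          PySem.List.max? (coordinates.map Prod.fst) (fun v => v),
          PySem.List.min? (coordinates.map Prod.snd) (fun v => v),
          PySem.List.max? (coordinates.map Prod.snd) (fun v => v) with
    | some mnx, some mxx, some mny, some mxy => some [mnx, mxx, mny, mxy]
    | _, _, _, _ => none  -- unreachable: the list is nonempty

-- ===== PORT B =====
-- B: seed the four accumulators from the first point, one pass over the rest.
def find_mbr_alt (coordinates : List (Int × Int)) : Option (List Int) :=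
  match coordinates with
  | [] => none
  | (x, y) :: rest =>
    let s := rest.foldl
      (fun (acc : Int × Int × Int × Int) (p : Int × Int) =>
        let a1 := if p.1 < acc.1 then p.1 else acc.1
        let a2 := if p.1 > acc.2.1 then p.1 else acc.2.1
        let a3 := if p.2 < acc.2.2.1 then p.2 else acc.2.2.1
        let a4 := if p.2 > acc.2.2.2 then p.2 else acc.2.2.2
        (a1, a2, a3, a4))
      (x, x, y, y)
    some [s.1, s.2.1, s.2.2.1, s.2.2.2]

-- ===== PRECONDITION & SPEC =====
def Spec_find_mbr (coordinates : List (Int × Int)) (out : Option (List Int)) : Prop := out = find_mbr_alt coordinates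
instance (coordinates : List (Int × Int)) (out : Option (List Int)) : Decidable (Spec_find_mbr coordinates out) := by unfold Spec_find_mbr; infer_instance

-- ===== CLAIM (what is proved, stated in full; the proofs are below) =====
def Claim_equal_find_mbr : Prop := ∀ (coordinates : List (Int × Int)), Dom_find_mbr coordinates → Spec_find_mbr coordinates (find_mbr coordinates)

-- ===== LEMMAS AND PROOFS =====

theorem fold_quad (rest : List (Int × Int)) (a b c d : Int) :
    rest.foldl
      (fun (acc : Int × Int × Int × Int) (p : Int × Int) =>
        let a1 := if p.1 < acc.1 then p.1 else acc.1
        let a2 := if p.1 > acc.2.1 then p.1 else acc.2.1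
        let a3 := if p.2 < acc.2.2.1 then p.2 else acc.2.2.1
        let a4 := if p.2 > acc.2.2.2 then p.2 else acc.2.2.2
        (a1, a2, a3, a4))
      (a, b, c, d)
    = ((rest.map Prod.fst).foldl min a, (rest.map Prod.fst).foldl max b,
       (rest.map Prod.snd).foldl min c, (rest.map Prod.snd).foldl max d) := by
  induction rest generalizing a b c d with
  | nil => rfl
  | cons p t ih =>
    simp only [List.foldl_cons, List.map_cons, ih]
    congr 1 <;> [skip; congr 1] <;> [skip; skip; congr 1] <;> congr 1 <;> omega

theorem find_mbr_spec : Claim_equal_find_mbr := by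
  intro coordinates _
  unfold Spec_find_mbr find_mbr find_mbr_alt
  match coordinates with
  | [] => rfl
  | (x, y) :: rest =>
    simp only [List.map_cons, PySem.List.min?_id_cons, PySem.List.max?_id_cons, fold_quad]
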